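-- pv_equiv track=rewrite | github.com/supernomial/transfer-pricing | skills/local-file/scripts/generate_blueprint.py | generate_benchmark_sections
-- ===== SOURCE A (Python) =====
-- def slug_to_underscores(slug):
--     """Convert a hyphenated slug to underscores: 'tx-001' -> 'tx_001'."""
--     return slug.replace('-', '_')
--
-- def generate_benchmark_sections(transactions, data):
--     """Generate Benchmark Application sections for each unique benchmark.
--
--     Collects unique benchmark IDs from the covered transactions, then
--     generates content-type sections per benchmark. Auto-type sections
--     (allocation, search_strategy, search_results, adjustments) are omitted.
--     """
--     seen = []
--     for tx in transactions:
--         bm_id = tx.get('benchmark')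
--         if bm_id and bm_id not in seen:
--             seen.append(bm_id)
--
--     sections = {}
--     for bm_id in seen:
--         slug = slug_to_underscores(bm_id)
--         sections[f'bm_{slug}_allocation_intro'] = '[Allocation]'
--         # OMIT bm_{slug}_allocation — auto type
--         sections[f'bm_{slug}_search_strategy_intro'] = '[Search Strategy]'
--         # OMIT bm_{slug}_search_strategy — auto type
--         sections[f'bm_{slug}_search_results_intro'] = '[Search Results]'
--         # OMIT bm_{slug}_search_results — auto type
--         sections[f'bm_{slug}_adjustments_intro'] = '[Comparability Adjustments]'
--         # OMIT bm_{slug}_adjustments — auto type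
--         sections[f'bm_{slug}_conclusion'] = '[Benchmark Conclusion]'
--
--     return sections
-- ===== SOURCE B (Python) =====
-- _SECTIONS = [
--     ("allocation_intro", "[Allocation]"),
--     ("search_strategy_intro", "[Search Strategy]"),
--     ("search_results_intro", "[Search Results]"),
--     ("adjustments_intro", "[Comparability Adjustments]"),
--     ("conclusion", "[Benchmark Conclusion]"),
-- ]
--
-- def generate_benchmark_sections(transactions, data):
--     """Single pass over transactions, table-driven; duplicate benchmark IDs
--     just overwrite identical entries, preserving first-insertion order."""
--     sections = {}
--     for tx in transactions:
--         bm_id = tx.get('benchmark')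
--         if bm_id:
--             slug = bm_id.replace('-', '_')
--             for suffix, label in _SECTIONS:
--                 sections[f'bm_{slug}_{suffix}'] = label
--     return sections
-- ===== Notes on version B (the rewrite author's own statement) =====
-- stated objective: simpler
-- what changed: Replaced A's two-pass design (dedup into a 'seen' list, then emit five hard-coded assignments per unique id) with a single table-driven pass over transactions, relying on dict overwrite preserving first-insertion order so duplicates are harmless.
import Mathlib
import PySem

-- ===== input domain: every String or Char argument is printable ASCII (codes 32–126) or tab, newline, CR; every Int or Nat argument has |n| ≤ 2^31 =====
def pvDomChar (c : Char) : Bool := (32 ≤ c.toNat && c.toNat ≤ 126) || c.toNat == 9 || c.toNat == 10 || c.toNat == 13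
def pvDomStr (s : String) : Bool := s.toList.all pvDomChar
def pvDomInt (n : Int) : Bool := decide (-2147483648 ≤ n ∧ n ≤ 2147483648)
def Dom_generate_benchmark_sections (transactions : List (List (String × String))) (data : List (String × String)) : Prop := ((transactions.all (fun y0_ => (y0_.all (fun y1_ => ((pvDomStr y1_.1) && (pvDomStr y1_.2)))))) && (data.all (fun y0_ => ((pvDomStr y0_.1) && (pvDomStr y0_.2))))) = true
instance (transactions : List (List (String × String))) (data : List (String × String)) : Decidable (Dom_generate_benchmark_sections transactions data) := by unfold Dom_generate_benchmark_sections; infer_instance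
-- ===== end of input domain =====

-- B replaces A's two-pass design (dedup 'seen' list, then five hard-coded assignments per unique id)
-- with one table-driven pass over the transactions (objective: simpler).

-- ===== PORT A =====
def slug_to_underscores (slug : String) : String := PySem.Str.replace slug "-" "_"

-- first loop of A: collect unique truthy benchmark ids in order of first appearance
def pvSeenStep (seen : List String) (tx : List (String × String)) : List String :=
  match (PySem.Dict.mk tx).get? "benchmark" with
  | none => seen
  | some bm_id => if bm_id ≠ "" ∧ bm_id ∉ seen then seen ++ [bm_id] else seen

-- body of A's second loop: the five section assignments for one benchmark id
def pvEmitA (sections : PySem.Dict String String) (bm_id : String) : PySem.Dict String String :=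
  let slug := slug_to_underscores bm_id
  (((((sections.insert ("bm_" ++ slug ++ "_allocation_intro") "[Allocation]").insert
      ("bm_" ++ slug ++ "_search_strategy_intro") "[Search Strategy]").insert
      ("bm_" ++ slug ++ "_search_results_intro") "[Search Results]").insert
      ("bm_" ++ slug ++ "_adjustments_intro") "[Comparability Adjustments]").insert
      ("bm_" ++ slug ++ "_conclusion") "[Benchmark Conclusion]")

def generate_benchmark_sections (transactions : List (List (String × String))) (data : List (String × String)) : List (String × String) :=
  let seen := transactions.foldl pvSeenStep []
  (seen.foldl pvEmitA (PySem.Dict.empty : PySem.Dict String String)).items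

-- ===== PORT B =====
def pvSectionTable : List (String × String) :=
  [("allocation_intro", "[Allocation]"),
   ("search_strategy_intro", "[Search Strategy]"),
   ("search_results_intro", "[Search Results]"),
   ("adjustments_intro", "[Comparability Adjustments]"),
   ("conclusion", "[Benchmark Conclusion]")]

-- body of B's single loop over transactions
def pvTxStep (sections : PySem.Dict String String) (tx : List (String × String)) : PySem.Dict String String :=
  match (PySem.Dict.mk tx).get? "benchmark" with
  | none => sections
  | some bm_id =>
    if bm_id ≠ "" then
      pvSectionTable.foldl
        (fun sections p => sections.insert ("bm_" ++ PySem.Str.replace bm_id "-" "_" ++ "_" ++ p.1) p.2)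
        sections
    else sections

def generate_benchmark_sections_alt (transactions : List (List (String × String))) (data : List (String × String)) : List (String × String) :=
  (transactions.foldl pvTxStep (PySem.Dict.empty : PySem.Dict String String)).items

-- ===== PRECONDITION & SPEC =====
def Spec_generate_benchmark_sections (transactions : List (List (String × String))) (data : List (String × String)) (out : List (String × String)) : Prop := out = generate_benchmark_sections_alt transactions data
instance (transactions : List (List (String × String))) (data : List (String × String)) (out : List (String × String)) : Decidable (Spec_generate_benchmark_sections transactions data out) := by unfold Spec_generate_benchmark_sections; infer_instance

-- ===== CLAIM (what is proved, stated in full; the proofs are below) =====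
def Claim_equal_generate_benchmark_sections : Prop := ∀ (transactions : List (List (String × String))) (data : List (String × String)), Dom_generate_benchmark_sections transactions data → Spec_generate_benchmark_sections transactions data (generate_benchmark_sections transactions data)

-- ===== LEMMAS AND PROOFS =====

-- suffix/value table with the '_' joined into the suffix, and the full key of one section
def pvSL : List (String × String) :=
  [("_allocation_intro", "[Allocation]"),
   ("_search_strategy_intro", "[Search Strategy]"),
   ("_search_results_intro", "[Search Results]"),
   ("_adjustments_intro", "[Comparability Adjustments]"),
   ("_conclusion", "[Benchmark Conclusion]")]

def pvKey (bm s : String) : String := "bm_" ++ slug_to_underscores bm ++ s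

def pvEmit (d : PySem.Dict String String) (bm : String) : PySem.Dict String String :=
  pvSL.foldl (fun d q => d.insert (pvKey bm q.1) q.2) d

lemma pvStrEq {a b : String} (h : a.toList = b.toList) : a = b := by
  apply String.ext
  simpa using h

-- no suffix in the table is a suffix of a different one
lemma pvSL_suffix : ∀ p ∈ pvSL, ∀ q ∈ pvSL, q.1.toList <:+ p.1.toList → p = q := by decide

-- equal full keys force equal table entries (labels included)
lemma pvKey_inj {p q : String × String} (hp : p ∈ pvSL) (hq : q ∈ pvSL) {a b : String}
    (h : pvKey a p.1 = pvKey b q.1) : p = q := by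
  have h' : "bm_".toList ++ ((slug_to_underscores a).toList ++ p.1.toList)
      = "bm_".toList ++ ((slug_to_underscores b).toList ++ q.1.toList) := by
    have := congrArg String.toList h
    simpa [pvKey] using this
  have h2 := List.append_cancel_left h'
  rcases List.append_eq_append_iff.mp h2 with ⟨c, _, hc⟩ | ⟨c, _, hc⟩
  · exact pvSL_suffix p hp q hq ⟨c, hc.symm⟩
  · exact (pvSL_suffix q hq p hp ⟨c, hc.symm⟩).symm

-- overwriting a key with the value it already holds is the identity
lemma pvInsert_id {d : PySem.Dict String String} {k v : String}
    (hn : d.keys.Nodup) (h : d.get? k = some v) : d.insert k v = d := by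
  apply PySem.Dict.ext
  have hc : d.contains k = true := by
    rw [PySem.Dict.contains_eq_isSome_get?, h]; rfl
  rw [PySem.Dict.items_insert, if_pos hc]
  conv_rhs => rw [← List.map_id d.items]
  apply List.map_congr_left
  rintro ⟨p1, p2⟩ hpmem
  by_cases hpk : p1 = k
  · subst hpk
    have hget : d.get? p1 = some p2 := PySem.Dict.get?_of_mem_items d hpmem hn
    have hv : p2 = v := Option.some.inj (hget.symm.trans h)
    subst hv
    simp
  · simp [hpk]

-- a lookup of a full key survives the five inserts for any other benchmark id
lemma pvGet_foldl_insert_out {p : String × String} (hp : p ∈ pvSL) {bm b : String} :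
    ∀ (l : List (String × String)), (∀ q ∈ l, q ∈ pvSL) → ∀ d : PySem.Dict String String,
      d.get? (pvKey bm p.1) = some p.2 →
      (l.foldl (fun d q => d.insert (pvKey b q.1) q.2) d).get? (pvKey bm p.1) = some p.2 := by
  intro l
  induction l with
  | nil => intro _ d h; exact h
  | cons q l ih =>
    intro hsub d h
    simp only [List.foldl_cons]
    apply ih (fun r hr => hsub r (List.mem_cons_of_mem _ hr))
    rw [PySem.Dict.get?_insert]
    split_ifs with hk
    · have hpq := pvKey_inj hp (hsub q (List.mem_cons_self)) hk
      rw [hpq]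
    · exact h

lemma pvGet_pvEmit_self {p : String × String} (hp : p ∈ pvSL)
    (d : PySem.Dict String String) (bm : String) :
    (pvEmit d bm).get? (pvKey bm p.1) = some p.2 := by
  obtain ⟨l1, l2, hsplit⟩ := List.append_of_mem hp
  unfold pvEmit
  rw [hsplit, List.foldl_append, List.foldl_cons]
  apply pvGet_foldl_insert_out hp l2
      (fun r hr => by rw [hsplit]; exact List.mem_append_right _ (List.mem_cons_of_mem _ hr))
  exact PySem.Dict.get?_insert_self _ _ _

lemma pvGet_pvEmit_out {p : String × String} (hp : p ∈ pvSL) {bm b : String}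
    {d : PySem.Dict String String} (h : d.get? (pvKey bm p.1) = some p.2) :
    (pvEmit d b).get? (pvKey bm p.1) = some p.2 :=
  pvGet_foldl_insert_out hp pvSL (fun _ hq => hq) d h

lemma pvGet_foldl_pvEmit_out {p : String × String} (hp : p ∈ pvSL) {bm : String} :
    ∀ (l : List String) (d : PySem.Dict String String),
      d.get? (pvKey bm p.1) = some p.2 →
      (l.foldl pvEmit d).get? (pvKey bm p.1) = some p.2 := by
  intro l
  induction l with
  | nil => intro d h; exact h
  | cons b l ih =>
    intro d h
    simp only [List.foldl_cons]
    exact ih _ (pvGet_pvEmit_out hp h)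

lemma pvGet_emitAll {p : String × String} (hp : p ∈ pvSL) {bm : String} :
    ∀ (seen : List String), bm ∈ seen → ∀ d : PySem.Dict String String,
      (seen.foldl pvEmit d).get? (pvKey bm p.1) = some p.2 := by
  intro seen
  induction seen with
  | nil => intro h; cases h
  | cons b seen ih =>
    intro hmem d
    simp only [List.foldl_cons]
    rcases List.mem_cons.mp hmem with rfl | hmem'
    · exact pvGet_foldl_pvEmit_out hp seen _ (pvGet_pvEmit_self hp d bm)
    · exact ih hmem' _

lemma pvNodup_foldl : ∀ (l : List String) (d : PySem.Dict String String),
    d.keys.Nodup → (l.foldl pvEmit d).keys.Nodup := by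
  intro l
  induction l with
  | nil => intro d h; exact h
  | cons b l ih =>
    intro d h
    simp only [List.foldl_cons]
    exact ih _ (PySem.Dict.nodup_keys_foldl_insert_key pvSL (fun q => pvKey b q.1) (fun d q => q.2) d h)

-- re-emitting an already-emitted benchmark id changes nothing
lemma pvEmit_mem {bm : String} {seen : List String} (hmem : bm ∈ seen) :
    pvEmit (seen.foldl pvEmit (PySem.Dict.empty : PySem.Dict String String)) bm
      = seen.foldl pvEmit (PySem.Dict.empty : PySem.Dict String String) := by
  have hnod := pvNodup_foldl seen PySem.Dict.empty (by simp)
  have hget : ∀ q ∈ pvSL,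
      (seen.foldl pvEmit (PySem.Dict.empty : PySem.Dict String String)).get? (pvKey bm q.1) = some q.2 :=
    fun q hq => pvGet_emitAll hq seen hmem _
  have key : ∀ (l : List (String × String)), (∀ q ∈ l, q ∈ pvSL) →
      l.foldl (fun d q => d.insert (pvKey bm q.1) q.2)
          (seen.foldl pvEmit (PySem.Dict.empty : PySem.Dict String String))
        = seen.foldl pvEmit (PySem.Dict.empty : PySem.Dict String String) := by
    intro l
    induction l with
    | nil => intro _; rfl
    | cons q l ih =>
      intro hsub
      simp only [List.foldl_cons]
      rw [pvInsert_id hnod (hget q (hsub q List.mem_cons_self))]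
      exact ih (fun r hr => hsub r (List.mem_cons_of_mem _ hr))
  exact key pvSL (fun _ hq => hq)

-- string glue: s ++ "_" ++ t = s ++ ("_" ++ t) as one literal
lemma pvCat (s : String) {t u : String} (h : "_".toList ++ t.toList = u.toList) :
    s ++ "_" ++ t = s ++ u := by
  apply pvStrEq
  simp [← h]

lemma pvEmitA_eq (d : PySem.Dict String String) (bm : String) : pvEmitA d bm = pvEmit d bm := by
  simp only [pvEmitA, pvEmit, pvSL, pvKey, List.foldl]

lemma pvB_inner (d : PySem.Dict String String) (bm : String) :
    pvSectionTable.foldl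
      (fun sections p => sections.insert ("bm_" ++ PySem.Str.replace bm "-" "_" ++ "_" ++ p.1) p.2)
      d = pvEmit d bm := by
  have h1 := pvCat ("bm_" ++ PySem.Str.replace bm "-" "_") (t := "allocation_intro") (u := "_allocation_intro") (by decide)
  have h2 := pvCat ("bm_" ++ PySem.Str.replace bm "-" "_") (t := "search_strategy_intro") (u := "_search_strategy_intro") (by decide)
  have h3 := pvCat ("bm_" ++ PySem.Str.replace bm "-" "_") (t := "search_results_intro") (u := "_search_results_intro") (by decide)
  have h4 := pvCat ("bm_" ++ PySem.Str.replace bm "-" "_") (t := "adjustments_intro") (u := "_adjustments_intro") (by decide)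
  have h5 := pvCat ("bm_" ++ PySem.Str.replace bm "-" "_") (t := "conclusion") (u := "_conclusion") (by decide)
  simp only [pvSectionTable, pvEmit, pvSL, pvKey, slug_to_underscores, List.foldl]
  rw [h1, h2, h3, h4, h5]

-- main loop correspondence: B's single pass over the transactions equals
-- A's dedup pass followed by one emission per unique id
lemma pvLoop : ∀ (txs : List (List (String × String))) (seen : List String),
    txs.foldl pvTxStep (seen.foldl pvEmit (PySem.Dict.empty : PySem.Dict String String))
      = (txs.foldl pvSeenStep seen).foldl pvEmit (PySem.Dict.empty : PySem.Dict String String) := by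
  intro txs
  induction txs with
  | nil => intro seen; rfl
  | cons tx txs ih =>
    intro seen
    simp only [List.foldl_cons]
    rcases hbm : (PySem.Dict.mk tx).get? "benchmark" with _ | bm
    · simp only [pvTxStep, pvSeenStep, hbm]
      exact ih seen
    · by_cases hne : bm = ""
      · simp only [pvTxStep, pvSeenStep, hbm, hne]
        rw [if_neg (by simp), if_neg (by simp)]
        exact ih seen
      · by_cases hmem : bm ∈ seen
        · simp only [pvTxStep, pvSeenStep, hbm]
          rw [if_pos hne, if_neg (by simp [hmem]), pvB_inner, pvEmit_mem hmem]
          exact ih seen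
        · simp only [pvTxStep, pvSeenStep, hbm]
          rw [if_pos hne, if_pos ⟨hne, hmem⟩, pvB_inner]
          have hstep : pvEmit (seen.foldl pvEmit (PySem.Dict.empty : PySem.Dict String String)) bm
              = (seen ++ [bm]).foldl pvEmit (PySem.Dict.empty : PySem.Dict String String) := by
            rw [List.foldl_append]; rfl
          rw [hstep]
          exact ih (seen ++ [bm])

-- ===== VERDICT (by name: the statement is the Claim_ definition above) =====
theorem generate_benchmark_sections_spec : Claim_equal_generate_benchmark_sections := by
  intro transactions data _
  unfold Spec_generate_benchmark_sections generate_benchmark_sections generate_benchmark_sections_alt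
  have hAB : pvEmitA = pvEmit := funext fun d => funext fun bm => pvEmitA_eq d bm
  rw [hAB]
  exact congrArg PySem.Dict.items (pvLoop transactions []).symm
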